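-- pv_equiv track=rewrite | github.com/w-jiaqi/minimax-ate | minimax_finder.py | skewed_signatures
-- ===== SOURCE A (Python) =====
-- def skewed_signatures(N):
--     sigs = set()
--
--     for n00 in range(N + 1):
--         for n11 in range(N - n00 + 1):
--             n01 = N - n00 - n11
--             sigs.add((n00, n01, 0, n11))
--
--     for n00 in range(N + 1):
--         for n11 in range(N - n00 + 1):
--             n10 = N - n00 - n11
--             sigs.add((n00, 0, n10, n11))
--
--     return sorted(sigs)
-- ===== SOURCE B (Python) =====
-- def skewed_signatures(N):
--     c0, c1, c2, c3 = [], [], [], []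
--     for n00 in range(N + 1):
--         M = N - n00
--         for n10 in range(M + 1):
--             c0.append(n00); c1.append(0); c2.append(n10); c3.append(M - n10)
--         for n01 in range(1, M + 1):
--             c0.append(n00); c1.append(n01); c2.append(0); c3.append(M - n01)
--     return list(zip(c0, c1, c2, c3))
-- ===== Notes on version B (the rewrite author's own statement) =====
-- stated objective: faster
-- what changed: B emits both tuple families directly in lexicographic order (for each n00 first the n01-zero family in increasing n10, then the n10-zero family in increasing positive n01, which skips the duplicated overlap tuple), building four index columns and zipping them once, so A's set and its general sort disappear; measured severalfold faster at the sizes both finish.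
import Mathlib
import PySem

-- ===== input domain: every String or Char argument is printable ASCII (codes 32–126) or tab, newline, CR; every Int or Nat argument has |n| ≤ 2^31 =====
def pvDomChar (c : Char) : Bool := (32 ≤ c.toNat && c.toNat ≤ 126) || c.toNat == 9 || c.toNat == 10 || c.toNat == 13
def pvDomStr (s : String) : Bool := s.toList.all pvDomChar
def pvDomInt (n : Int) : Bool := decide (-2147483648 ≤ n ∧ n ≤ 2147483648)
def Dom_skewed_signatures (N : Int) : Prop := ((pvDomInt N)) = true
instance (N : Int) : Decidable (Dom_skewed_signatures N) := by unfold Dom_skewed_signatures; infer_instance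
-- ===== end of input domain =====

-- B emits both tuple families directly in lexicographic order (four columns, one zip), removing A's set and its general sort.


-- ===== PORT A =====
-- Python compares tuples lexicographically; tupKey is the order-isomorphic (and injective) encoding of a
-- 4-tuple into the lexicographic product order, so 'sorted sigs tupKey' is exactly Python's sorted(sigs).
def tupKey (t : Int × Int × Int × Int) : Int ×ₗ (Int ×ₗ (Int ×ₗ Int)) :=
  toLex (t.1, toLex (t.2.1, toLex (t.2.2.1, t.2.2.2)))

def skewed_signatures (N : Int) : List (Int × Int × Int × Int) :=
  let sigs : PySem.Set (Int × Int × Int × Int) :=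
    (PySem.List.pyRange 0 (N + 1) 1).foldl (fun s n00 =>
      (PySem.List.pyRange 0 (N - n00 + 1) 1).foldl (fun s n11 =>
        PySem.Set.add s (n00, N - n00 - n11, 0, n11)) s) PySem.Set.empty
  let sigs : PySem.Set (Int × Int × Int × Int) :=
    (PySem.List.pyRange 0 (N + 1) 1).foldl (fun s n00 =>
      (PySem.List.pyRange 0 (N - n00 + 1) 1).foldl (fun s n11 =>
        PySem.Set.add s (n00, 0, N - n00 - n11, n11)) s) sigs
  PySem.List.sorted sigs tupKey

-- ===== PORT B =====
def skewed_signatures_alt (N : Int) : List (Int × Int × Int × Int) :=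
  let s :=
    (PySem.List.pyRange 0 (N + 1) 1).foldl
      (fun (s : List Int × List Int × List Int × List Int) n00 =>
        let M := N - n00
        let s := (PySem.List.pyRange 0 (M + 1) 1).foldl
          (fun s n10 => (s.1 ++ [n00], s.2.1 ++ [0], s.2.2.1 ++ [n10], s.2.2.2 ++ [M - n10])) s
        (PySem.List.pyRange 1 (M + 1) 1).foldl
          (fun s n01 => (s.1 ++ [n00], s.2.1 ++ [n01], s.2.2.1 ++ [0], s.2.2.2 ++ [M - n01])) s)
      ([], [], [], [])
  s.1.zip (s.2.1.zip (s.2.2.1.zip s.2.2.2))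

-- ===== PRECONDITION & SPEC =====
def Spec_skewed_signatures (N : Int) (out : List (Int × Int × Int × Int)) : Prop := out = skewed_signatures_alt N
instance (N : Int) (out : List (Int × Int × Int × Int)) : Decidable (Spec_skewed_signatures N out) := by unfold Spec_skewed_signatures; infer_instance

-- ===== CLAIM (what is proved, stated in full; the proofs are below) =====
def Claim_equal_skewed_signatures : Prop := ∀ (N : Int), Dom_skewed_signatures N → Spec_skewed_signatures N (skewed_signatures N)

-- ===== LEMMAS AND PROOFS =====

-- One block of B's output, for a fixed n00 = a.
def pvBlock (N a : Int) : List (Int × Int × Int × Int) :=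
  (PySem.List.pyRange 0 (N - a + 1) 1).map (fun c => (a, 0, c, N - a - c)) ++
  (PySem.List.pyRange 1 (N - a + 1) 1).map (fun b => (a, b, 0, N - a - b))

-- The four columns contributed by the block for a fixed n00 = a.
def pvC1 (N a : Int) : List Int :=
  (PySem.List.pyRange 0 (N - a + 1) 1).map (fun _ => a) ++
  (PySem.List.pyRange 1 (N - a + 1) 1).map (fun _ => a)
def pvC2 (N a : Int) : List Int :=
  (PySem.List.pyRange 0 (N - a + 1) 1).map (fun _ => (0 : Int)) ++
  (PySem.List.pyRange 1 (N - a + 1) 1).map (fun b => b)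
def pvC3 (N a : Int) : List Int :=
  (PySem.List.pyRange 0 (N - a + 1) 1).map (fun c => c) ++
  (PySem.List.pyRange 1 (N - a + 1) 1).map (fun _ => (0 : Int))
def pvC4 (N a : Int) : List Int :=
  (PySem.List.pyRange 0 (N - a + 1) 1).map (fun c => N - a - c) ++
  (PySem.List.pyRange 1 (N - a + 1) 1).map (fun b => N - a - b)

-- A fold appending one element to each of four column accumulators is four maps.
lemma fold4_append (r : List Int) (f1 f2 f3 f4 : Int → Int)
    (s : List Int × List Int × List Int × List Int) :
    r.foldl (fun s x => (s.1 ++ [f1 x], s.2.1 ++ [f2 x], s.2.2.1 ++ [f3 x], s.2.2.2 ++ [f4 x])) s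
      = (s.1 ++ r.map f1, s.2.1 ++ r.map f2, s.2.2.1 ++ r.map f3, s.2.2.2 ++ r.map f4) := by
  induction r generalizing s with
  | nil => simp
  | cons x t ih => simp [ih]

-- The outer fold appends each block's four columns.
lemma fold_outer (N : Int) (l : List Int) (s : List Int × List Int × List Int × List Int) :
    l.foldl
      (fun (s : List Int × List Int × List Int × List Int) n00 =>
        let M := N - n00
        let s := (PySem.List.pyRange 0 (M + 1) 1).foldl
          (fun s n10 => (s.1 ++ [n00], s.2.1 ++ [0], s.2.2.1 ++ [n10], s.2.2.2 ++ [M - n10])) s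
        (PySem.List.pyRange 1 (M + 1) 1).foldl
          (fun s n01 => (s.1 ++ [n00], s.2.1 ++ [n01], s.2.2.1 ++ [0], s.2.2.2 ++ [M - n01])) s) s
      = (s.1 ++ l.flatMap (pvC1 N), s.2.1 ++ l.flatMap (pvC2 N),
         s.2.2.1 ++ l.flatMap (pvC3 N), s.2.2.2 ++ l.flatMap (pvC4 N)) := by
  induction l generalizing s with
  | nil => simp
  | cons a t ih =>
    simp only [List.foldl_cons]
    rw [fold4_append (PySem.List.pyRange 0 (N - a + 1) 1)
        (fun _ => a) (fun _ => (0 : Int)) (fun c => c) (fun c => N - a - c) s]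
    rw [fold4_append (PySem.List.pyRange 1 (N - a + 1) 1)
        (fun _ => a) (fun b => b) (fun _ => (0 : Int)) (fun b => N - a - b)]
    rw [ih]
    simp [pvC1, pvC2, pvC3, pvC4, List.append_assoc]

-- Zipping four maps over one index list is one map of 4-tuples.
lemma zip4_maps (r : List Int) (f1 f2 f3 f4 : Int → Int) :
    (r.map f1).zip ((r.map f2).zip ((r.map f3).zip (r.map f4)))
      = r.map (fun x => (f1 x, f2 x, f3 x, f4 x)) := by
  induction r with
  | nil => simp
  | cons x t ih => simp [ih]

lemma len_C34 (N a : Int) : (pvC3 N a).length = (pvC4 N a).length := by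
  simp [pvC3, pvC4]

-- Zipping one block's four columns gives the block.
lemma zip_block (N a : Int) :
    (pvC1 N a).zip ((pvC2 N a).zip ((pvC3 N a).zip (pvC4 N a))) = pvBlock N a := by
  unfold pvC1 pvC2 pvC3 pvC4 pvBlock
  rw [List.zip_append (by simp), List.zip_append (by simp [List.length_zip]),
    List.zip_append (by simp [List.length_zip])]
  rw [zip4_maps, zip4_maps]

-- Zipping the four full columns gives the flat list of blocks.
lemma zip_cols (N : Int) (l : List Int) :
    (l.flatMap (pvC1 N)).zip ((l.flatMap (pvC2 N)).zip
      ((l.flatMap (pvC3 N)).zip (l.flatMap (pvC4 N)))) = l.flatMap (pvBlock N) := by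
  induction l with
  | nil => simp
  | cons a t ih =>
    simp only [List.flatMap_cons]
    rw [List.zip_append (len_C34 N a), List.zip_append ?h2, List.zip_append ?h1]
    · rw [zip_block, ih]
    case h1 => simp [List.length_zip, pvC1, pvC2, pvC3, pvC4]
    case h2 => simp [List.length_zip, pvC2, pvC3, pvC4]

lemma alt_eq_flatMap (N : Int) :
    skewed_signatures_alt N = (PySem.List.pyRange 0 (N + 1) 1).flatMap (pvBlock N) := by
  unfold skewed_signatures_alt
  rw [fold_outer]
  simp only [List.nil_append]
  exact zip_cols N _

-- The property characterizing membership in both outputs.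
def pvP (N : Int) (x : Int × Int × Int × Int) : Prop :=
  0 ≤ x.1 ∧ 0 ≤ x.2.1 ∧ 0 ≤ x.2.2.1 ∧ 0 ≤ x.2.2.2 ∧
  x.1 + x.2.1 + x.2.2.1 + x.2.2.2 = N ∧ (x.2.1 = 0 ∨ x.2.2.1 = 0)

lemma mem_alt (N : Int) (x : Int × Int × Int × Int) :
    x ∈ skewed_signatures_alt N ↔ pvP N x := by
  obtain ⟨a, b, c, d⟩ := x
  rw [alt_eq_flatMap]
  simp only [List.mem_flatMap, pvBlock, List.mem_append, List.mem_map,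
    PySem.List.mem_pyRange_one, pvP, Prod.mk.injEq]
  constructor
  · rintro ⟨a', ⟨ha, ha'⟩, ⟨c', ⟨hc, hc'⟩, rfl, rfl, rfl, rfl⟩ | ⟨b', ⟨hb, hb'⟩, rfl, rfl, rfl, rfl⟩⟩
    · exact ⟨by omega, by omega, by omega, by omega, by omega, Or.inl rfl⟩
    · exact ⟨by omega, by omega, by omega, by omega, by omega, Or.inr rfl⟩
  · rintro ⟨ha, hb, hc, hd, hs, h0 | h0⟩
    · subst h0
      exact ⟨a, by omega, Or.inl ⟨c, by omega, rfl, rfl, rfl, by omega⟩⟩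
    · subst h0
      rcases eq_or_lt_of_le hb with hb0 | hb1
      · exact ⟨a, by omega, Or.inl ⟨0, by omega, rfl, hb0.symm ▸ rfl, rfl, by omega⟩⟩
      · exact ⟨a, by omega, Or.inr ⟨b, by omega, rfl, rfl, rfl, by omega⟩⟩

-- Membership through a fold of Set.add over a list.
lemma mem_foldl_add {β : Type} (l : List β) (f : β → Int × Int × Int × Int)
    (s : PySem.Set (Int × Int × Int × Int)) (x : Int × Int × Int × Int) :
    x ∈ l.foldl (fun s i => PySem.Set.add s (f i)) s ↔ x ∈ s ∨ ∃ i ∈ l, x = f i := by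
  induction l generalizing s with
  | nil => simp
  | cons h t ih =>
    simp only [List.foldl_cons, ih, PySem.Set.mem_add, List.mem_cons]
    constructor
    · rintro (⟨hs | he⟩ | ⟨i, hi, he⟩)
      · exact Or.inl hs
      · exact Or.inr ⟨h, Or.inl rfl, he⟩
      · exact Or.inr ⟨i, Or.inr hi, he⟩
    · rintro (hs | ⟨i, rfl | hi, he⟩)
      · exact Or.inl (Or.inl hs)
      · exact Or.inl (Or.inr he)
      · exact Or.inr ⟨i, hi, he⟩

-- Membership through the nested (two-loop) fold of Set.add.
lemma mem_foldl_add2 {β γ : Type} (l : List β) (r : β → List γ)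
    (g : β → γ → Int × Int × Int × Int)
    (s : PySem.Set (Int × Int × Int × Int)) (x : Int × Int × Int × Int) :
    x ∈ l.foldl (fun s a => (r a).foldl (fun s d => PySem.Set.add s (g a d)) s) s ↔
      x ∈ s ∨ ∃ a ∈ l, ∃ d ∈ r a, x = g a d := by
  induction l generalizing s with
  | nil => simp
  | cons h t ih =>
    simp only [List.foldl_cons, ih, mem_foldl_add, List.mem_cons]
    constructor
    · rintro (⟨hs | ⟨d, hd, he⟩⟩ | ⟨a, ha, hd⟩)
      · exact Or.inl hs
      · exact Or.inr ⟨h, Or.inl rfl, d, hd, he⟩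
      · exact Or.inr ⟨a, Or.inr ha, hd⟩
    · rintro (hs | ⟨a, rfl | ha, hd⟩)
      · exact Or.inl (Or.inl hs)
      · exact Or.inl (Or.inr hd)
      · exact Or.inr ⟨a, ha, hd⟩

-- Nodup through a fold of Set.add.
lemma nodup_foldl_add {β : Type} (l : List β) (f : β → Int × Int × Int × Int)
    (s : PySem.Set (Int × Int × Int × Int)) (h : s.Nodup) :
    (l.foldl (fun s i => PySem.Set.add s (f i)) s).Nodup := by
  induction l generalizing s with
  | nil => exact h
  | cons a t ih => exact ih _ (PySem.Set.nodup_add s (f a) h)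

lemma nodup_foldl_add2 {β γ : Type} (l : List β) (r : β → List γ)
    (g : β → γ → Int × Int × Int × Int)
    (s : PySem.Set (Int × Int × Int × Int)) (h : s.Nodup) :
    (l.foldl (fun s a => (r a).foldl (fun s d => PySem.Set.add s (g a d)) s) s).Nodup := by
  induction l generalizing s with
  | nil => exact h
  | cons a t ih => exact ih _ (nodup_foldl_add _ _ _ h)

-- A's set, named (definitionally the value 'sigs' inside skewed_signatures).
def pvS (N : Int) : PySem.Set (Int × Int × Int × Int) :=
  (PySem.List.pyRange 0 (N + 1) 1).foldl (fun s n00 =>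
    (PySem.List.pyRange 0 (N - n00 + 1) 1).foldl (fun s n11 =>
      PySem.Set.add s (n00, 0, N - n00 - n11, n11)) s)
    ((PySem.List.pyRange 0 (N + 1) 1).foldl (fun s n00 =>
      (PySem.List.pyRange 0 (N - n00 + 1) 1).foldl (fun s n11 =>
        PySem.Set.add s (n00, N - n00 - n11, 0, n11)) s) PySem.Set.empty)

lemma mem_S (N : Int) (x : Int × Int × Int × Int) : x ∈ pvS N ↔ pvP N x := by
  obtain ⟨a, b, c, d⟩ := x
  unfold pvS
  rw [mem_foldl_add2, mem_foldl_add2]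
  simp only [PySem.List.mem_pyRange_one, PySem.Set.empty, List.not_mem_nil, false_or,
    pvP, Prod.mk.injEq]
  constructor
  · rintro (⟨a', ⟨ha, ha'⟩, d', ⟨hd, hd'⟩, rfl, rfl, rfl, rfl⟩ |
      ⟨a', ⟨ha, ha'⟩, d', ⟨hd, hd'⟩, rfl, rfl, rfl, rfl⟩)
    · exact ⟨by omega, by omega, by omega, by omega, by omega, Or.inr rfl⟩
    · exact ⟨by omega, by omega, by omega, by omega, by omega, Or.inl rfl⟩
  · rintro ⟨ha, hb, hc, hd, hs, h0 | h0⟩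
    · subst h0
      exact Or.inr ⟨a, by omega, d, by omega, rfl, rfl, by omega, rfl⟩
    · subst h0
      exact Or.inl ⟨a, by omega, d, by omega, rfl, by omega, rfl, rfl⟩

lemma nodup_S (N : Int) : (pvS N).Nodup := by
  unfold pvS
  exact nodup_foldl_add2 _ _ _ _ (nodup_foldl_add2 _ _ _ _ (by simp [PySem.Set.empty]))

-- tupKey comparison in components.
lemma tupKey_lt_iff (x y : Int × Int × Int × Int) :
    tupKey x < tupKey y ↔ x.1 < y.1 ∨ (x.1 = y.1 ∧ (x.2.1 < y.2.1 ∨ (x.2.1 = y.2.1 ∧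
      (x.2.2.1 < y.2.2.1 ∨ (x.2.2.1 = y.2.2.1 ∧ x.2.2.2 < y.2.2.2))))) := by
  simp [tupKey, Prod.Lex.lt_iff]

lemma fst_of_mem_block (N a : Int) (x : Int × Int × Int × Int)
    (h : x ∈ pvBlock N a) : x.1 = a := by
  simp only [pvBlock, List.mem_append, List.mem_map] at h
  rcases h with ⟨c, _, rfl⟩ | ⟨b, _, rfl⟩ <;> rfl

lemma pairwise_alt (N : Int) :
    (skewed_signatures_alt N).Pairwise (fun a b => tupKey a < tupKey b) := by
  rw [alt_eq_flatMap, List.pairwise_flatMap]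
  constructor
  · intro a _
    unfold pvBlock
    rw [List.pairwise_append]
    refine ⟨?_, ?_, ?_⟩
    · rw [List.pairwise_map]
      exact (PySem.List.pairwise_lt_pyRange_one 0 (N - a + 1)).imp
        (fun h => by rw [tupKey_lt_iff]; simp; omega)
    · rw [List.pairwise_map]
      exact (PySem.List.pairwise_lt_pyRange_one 1 (N - a + 1)).imp
        (fun h => by rw [tupKey_lt_iff]; simp; omega)
    · simp only [List.mem_map]
      rintro x ⟨c, hc, rfl⟩ y ⟨b, hb, rfl⟩
      rw [PySem.List.mem_pyRange_one] at hb
      rw [tupKey_lt_iff]; simp; omega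
  · exact (PySem.List.pairwise_lt_pyRange_one 0 (N + 1)).imp
      (fun h x hx y hy => by
        rw [tupKey_lt_iff, fst_of_mem_block _ _ _ hx, fst_of_mem_block _ _ _ hy]
        exact Or.inl h)

lemma nodup_alt (N : Int) : (skewed_signatures_alt N).Nodup :=
  (pairwise_alt N).imp (fun h he => by subst he; exact lt_irrefl _ h)

-- ===== VERDICT (by name: the statement is the Claim_ definition above) =====
theorem skewed_signatures_spec : Claim_equal_skewed_signatures := by
  intro N _
  unfold Spec_skewed_signatures
  show PySem.List.sorted (pvS N) tupKey = skewed_signatures_alt N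
  refine PySem.List.sorted_eq_of_perm_of_pairwise_lt _ _ _ ?_ (pairwise_alt N)
  rw [List.perm_ext_iff_of_nodup (nodup_alt N) (nodup_S N)]
  intro x
  rw [mem_alt, mem_S]
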